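-- pv_equiv track=rewrite | github.com/ElementsProject/elements | test/functional/test_framework/liquid_addr.py | blech32_polymod
-- ===== SOURCE A (Python) =====
-- def blech32_polymod(values):
--     """Internal function that computes the blech32 checksum."""
--     generator = [0x7d52fba40bd886, 0x5e8dbf1a03950c, 0x1c3a3c74072a18, 0x385d72fa0e5139, 0x7093e5a608865b] # new generators, 7 bytes
--     chk = 1
--     for value in values:
--         top = chk >> 55 # 25->55
--         chk = ((chk & 0x7fffffffffffff) << 5) ^ value # 0x1ffffff->0x7fffffffffffff
--         for i in range(5):
--             chk ^= generator[i] if ((top >> i) & 1) else 0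
--     return chk
-- ===== SOURCE B (Python) =====
-- def blech32_polymod(values):
--     """Internal function that computes the blech32 checksum."""
--     generator = [0x7d52fba40bd886, 0x5e8dbf1a03950c, 0x1c3a3c74072a18, 0x385d72fa0e5139, 0x7093e5a608865b]
--     # table[t] = XOR of generator[i] for every bit i set in t, built by doubling
--     table = [0]
--     for g in generator:
--         table += [t ^ g for t in table]
--     chk = 1
--     for value in values:
--         top = chk >> 55
--         chk = ((chk & 0x7fffffffffffff) << 5) ^ value ^ table[top % 32]
--     return chk
-- ===== Notes on version B (the rewrite author's own statement) =====
-- stated objective: faster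
-- what changed: Replaced the inner 5-iteration conditional-XOR loop over the generator constants with a single lookup into a 32-entry table (built once by doubling: table[t] = XOR of generator[i] for each bit i set in t) indexed by the low five bits of top.
import Mathlib
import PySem

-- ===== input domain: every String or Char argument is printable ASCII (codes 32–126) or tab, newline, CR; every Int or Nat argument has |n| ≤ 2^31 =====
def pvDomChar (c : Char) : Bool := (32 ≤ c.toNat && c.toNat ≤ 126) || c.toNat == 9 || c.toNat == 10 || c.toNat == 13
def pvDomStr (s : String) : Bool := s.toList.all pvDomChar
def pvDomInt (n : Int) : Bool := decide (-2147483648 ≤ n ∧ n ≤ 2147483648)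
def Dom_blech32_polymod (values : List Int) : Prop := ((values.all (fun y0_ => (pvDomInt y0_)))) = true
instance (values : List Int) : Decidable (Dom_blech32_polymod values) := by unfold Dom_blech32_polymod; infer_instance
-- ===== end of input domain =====

-- B replaces the 5-iteration conditional-XOR inner loop with one lookup in a 32-entry
-- precomputed table indexed by the low five bits of `top` (objective: faster, constant factor).

-- ===== PORT A =====
def blech32_polymod (values : List Int) : Int :=
  let generator : List Int :=
    [0x7d52fba40bd886, 0x5e8dbf1a03950c, 0x1c3a3c74072a18, 0x385d72fa0e5139, 0x7093e5a608865b]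
  values.foldl (fun chk value =>
    let top := chk >>> 55
    let chk := PySem.Int.bxor ((PySem.Int.band chk 0x7fffffffffffff) <<< 5) value
    (PySem.List.pyRange 0 5 1).foldl (fun chk i =>
      PySem.Int.bxor chk
        (if PySem.Int.band (top >>> i.toNat) 1 ≠ 0 then (PySem.List.pyGet? generator i).getD 0 else 0))
      chk) 1

-- ===== PORT B =====
def blech32_polymod_alt (values : List Int) : Int :=
  let generator : List Int :=
    [0x7d52fba40bd886, 0x5e8dbf1a03950c, 0x1c3a3c74072a18, 0x385d72fa0e5139, 0x7093e5a608865b]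
  let table : List Int :=
    generator.foldl (fun table g => table ++ table.map (fun t => PySem.Int.bxor t g)) [0]
  values.foldl (fun chk value =>
    let top := chk >>> 55
    PySem.Int.bxor
      (PySem.Int.bxor ((PySem.Int.band chk 0x7fffffffffffff) <<< 5) value)
      ((PySem.List.pyGet? table (PySem.Int.mod top 32)).getD 0)) 1

-- ===== PRECONDITION & SPEC =====
def Spec_blech32_polymod (values : List Int) (out : Int) : Prop := out = blech32_polymod_alt values
instance (values : List Int) (out : Int) : Decidable (Spec_blech32_polymod values out) := by unfold Spec_blech32_polymod; infer_instance

-- ===== CLAIM (what is proved, stated in full; the proofs are below) =====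
def Claim_equal_blech32_polymod : Prop := ∀ (values : List Int), Dom_blech32_polymod values → Spec_blech32_polymod values (blech32_polymod values)

-- ===== LEMMAS AND PROOFS =====

theorem pv_bxor_eq_xor (a b : Int) : PySem.Int.bxor a b = Int.xor a b := by
  unfold PySem.Int.bxor
  rcases a with m | m <;> rcases b with n | n <;>
    simp [Int.xor, Int.negSucc_eq] <;> omega

theorem pv_xor_assoc (a b c : Int) : Int.xor (Int.xor a b) c = Int.xor a (Int.xor b c) := by
  rcases a with m | m <;> rcases b with n | n <;> rcases c with k | k <;>
    simp [Int.xor, Nat.xor_assoc]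

theorem pv_bxor_assoc (a b c : Int) :
    PySem.Int.bxor (PySem.Int.bxor a b) c = PySem.Int.bxor a (PySem.Int.bxor b c) := by
  simp [pv_bxor_eq_xor, pv_xor_assoc]

-- low bit i (i < 5) of `top` only depends on `top % 32`
theorem pv_bit_low (top : Int) (i : Nat) (h : i < 5) :
    PySem.Int.band (top >>> i) 1 = PySem.Int.band ((PySem.Int.mod top 32) >>> i) 1 := by
  have hm : PySem.Int.mod top 32 = top % 32 := by
    unfold PySem.Int.mod; simp [Int.fmod_eq_emod]
  rw [PySem.Int.band_one, PySem.Int.band_one, Int.shiftRight_eq_div_pow,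
      Int.shiftRight_eq_div_pow, hm]
  unfold PySem.Int.mod
  rw [show ((top / (2 ^ i : ℕ)).fmod 2) = (top / (2 ^ i : ℕ)) % 2 by simp [Int.fmod_eq_emod],
      show ((top % 32 / (2 ^ i : ℕ)).fmod 2) = (top % 32 / (2 ^ i : ℕ)) % 2 by simp [Int.fmod_eq_emod]]
  interval_cases i <;> push_cast <;> omega

-- the step of A equals the step of B, for an arbitrary `top` and accumulator `c`
theorem pv_step_eq (top c : Int) :
    ([0, 1, 2, 3, 4] : List Int).foldl (fun chk i =>
      PySem.Int.bxor chk
        (if PySem.Int.band (top >>> i.toNat) 1 ≠ 0 then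
           (PySem.List.pyGet? [(0x7d52fba40bd886 : Int), 0x5e8dbf1a03950c, 0x1c3a3c74072a18, 0x385d72fa0e5139, 0x7093e5a608865b] i).getD 0
         else 0)) c =
    PySem.Int.bxor c
      ((PySem.List.pyGet?
         ([(0x7d52fba40bd886 : Int), 0x5e8dbf1a03950c, 0x1c3a3c74072a18, 0x385d72fa0e5139, 0x7093e5a608865b].foldl
            (fun table g => table ++ table.map (fun t => PySem.Int.bxor t g)) [0])
         (PySem.Int.mod top 32)).getD 0) := by
  simp only [List.foldl, Int.shiftRight_natCast_right, Int.toNat_zero, Int.toNat_one,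
    (show ((2:Int)).toNat = 2 from rfl), (show ((3:Int)).toNat = 3 from rfl),
    (show ((4:Int)).toNat = 4 from rfl)]
  simp only [pv_bit_low top 0 (by norm_num), pv_bit_low top 1 (by norm_num),
    pv_bit_low top 2 (by norm_num), pv_bit_low top 3 (by norm_num), pv_bit_low top 4 (by norm_num)]
  rw [pv_bxor_assoc, pv_bxor_assoc, pv_bxor_assoc, pv_bxor_assoc]
  congr 1
  have hm : PySem.Int.mod top 32 = top % 32 := by
    unfold PySem.Int.mod; simp [Int.fmod_eq_emod]
  rw [hm]
  have h0 : 0 ≤ top % 32 := Int.emod_nonneg top (by norm_num)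
  have h1 : top % 32 < 32 := Int.emod_lt_of_pos top (by norm_num)
  generalize hr : top % 32 = r at h0 h1 ⊢
  interval_cases r <;> decide

theorem blech32_polymod_spec_aux (values : List Int) :
    blech32_polymod values = blech32_polymod_alt values := by
  unfold blech32_polymod blech32_polymod_alt
  induction values using List.reverseRecOn with
  | nil => rfl
  | append_singleton xs x ih =>
      simp only [List.foldl_append, List.foldl_cons, List.foldl_nil] at *
      rw [ih]
      exact pv_step_eq _ _

-- ===== VERDICT (by name: the statement is the Claim_ definition above) =====
theorem blech32_polymod_spec : Claim_equal_blech32_polymod := by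
  intro values _
  unfold Spec_blech32_polymod
  exact blech32_polymod_spec_aux values
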